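-- pv_equiv track=rewrite | github.com/HighLowMystery/highlowmystery.github.io | scripts/seo-review.py | create_remediation_tasks
-- ===== SOURCE A (Python) =====
-- def create_remediation_tasks(issues, health):
--     """Create tasks to fix critical issues found."""
--     tasks_needed = []
--
--     if not health["pipeline_ran_today"]:
--         tasks_needed.append({
--             "title": "[Affiliate] Debug: Daily pipeline did not run today",
--             "description": "Check cron job for daily-pipeline.py. Verify it's scheduled and running at 8 AM. Fix any errors.",
--             "priority": "P1"
--         })
--
--     amazon_tag_issues = [i for i in issues if "placeholder Amazon tag" in i]
--     if amazon_tag_issues: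
--         tasks_needed.append({
--             "title": "[Affiliate] Fix: Replace highlowmyst0e-20 with real Amazon tag",
--             "description": f"Replace placeholder Amazon affiliate tag in {len(amazon_tag_issues)} articles. Boss needs to provide actual Amazon Associates tag. Check hugo.toml and all content files.",
--             "priority": "P0"
--         })
--
--     thin_content = [i for i in issues if "thin content" in i]
--     if len(thin_content) >= 2:
--         tasks_needed.append({
--             "title": f"[Affiliate] Expand thin articles ({len(thin_content)} need work)",
--             "description": f"Articles under 1500 words won't rank. Expand these: {'; '.join(thin_content[:3])}. Add more product reviews, FAQ section, buying guide.",
--             "priority": "P2"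
--         })
--
--     faq_missing = [i for i in issues if "missing FAQ" in i]
--     if len(faq_missing) >= 3:
--         tasks_needed.append({
--             "title": f"[Affiliate] Add FAQ sections to {len(faq_missing)} articles",
--             "description": "FAQ sections improve featured snippet chances. Add 5 Q&A items to each article that lacks one. Use FAQ schema shortcode.",
--             "priority": "P2"
--         })
--
--     return tasks_needed
-- ===== SOURCE B (Python) =====
-- def create_remediation_tasks(issues, health):
--     """Create tasks to fix critical issues found."""
--     # Single pass over issues: count each category, keeping only the first 3
--     # thin-content examples needed for the description.
--     amazon_n = 0
--     thin_n = 0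
--     thin_first3 = []
--     faq_n = 0
--     for i in issues:
--         if "placeholder Amazon tag" in i:
--             amazon_n += 1
--         if "thin content" in i:
--             thin_n += 1
--             if len(thin_first3) < 3:
--                 thin_first3.append(i)
--         if "missing FAQ" in i:
--             faq_n += 1
--
--     tasks_needed = []
--     if not health["pipeline_ran_today"]:
--         tasks_needed.append({
--             "title": "[Affiliate] Debug: Daily pipeline did not run today",
--             "description": "Check cron job for daily-pipeline.py. Verify it's scheduled and running at 8 AM. Fix any errors.",
--             "priority": "P1"
--         })
--     if amazon_n:
--         tasks_needed.append({
--             "title": "[Affiliate] Fix: Replace highlowmyst0e-20 with real Amazon tag",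
--             "description": f"Replace placeholder Amazon affiliate tag in {amazon_n} articles. Boss needs to provide actual Amazon Associates tag. Check hugo.toml and all content files.",
--             "priority": "P0"
--         })
--     if thin_n >= 2:
--         tasks_needed.append({
--             "title": f"[Affiliate] Expand thin articles ({thin_n} need work)",
--             "description": f"Articles under 1500 words won't rank. Expand these: {'; '.join(thin_first3)}. Add more product reviews, FAQ section, buying guide.",
--             "priority": "P2"
--         })
--     if faq_n >= 3:
--         tasks_needed.append({
--             "title": f"[Affiliate] Add FAQ sections to {faq_n} articles",
--             "description": "FAQ sections improve featured snippet chances. Add 5 Q&A items to each article that lacks one. Use FAQ schema shortcode.",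
--             "priority": "P2"
--         })
--     return tasks_needed
-- ===== Notes on version B (the rewrite author's own statement) =====
-- stated objective: alternative
-- what changed: Replaces A's four independent filter passes over issues with a single loop that maintains three counters plus only the first three thin-content examples, then builds the same task dicts from those counts.
import Mathlib
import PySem

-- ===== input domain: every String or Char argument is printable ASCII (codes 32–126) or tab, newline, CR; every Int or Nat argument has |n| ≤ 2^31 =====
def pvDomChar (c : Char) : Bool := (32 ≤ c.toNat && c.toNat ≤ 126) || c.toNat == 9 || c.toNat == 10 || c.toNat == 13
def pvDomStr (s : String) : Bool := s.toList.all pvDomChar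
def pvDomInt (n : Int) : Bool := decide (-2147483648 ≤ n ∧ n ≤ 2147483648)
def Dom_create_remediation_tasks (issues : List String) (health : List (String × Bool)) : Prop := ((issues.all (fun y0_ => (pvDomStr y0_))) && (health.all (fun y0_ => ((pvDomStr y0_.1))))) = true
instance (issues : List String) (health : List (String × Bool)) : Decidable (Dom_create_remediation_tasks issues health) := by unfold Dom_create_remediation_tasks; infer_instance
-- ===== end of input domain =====

-- B replaces A's four independent filter passes over `issues` by ONE fold that keeps
-- three counters and the first three thin-content examples; objective: alternative
-- (single pass, O(1) extra space for the thin-example list instead of full filtered lists).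
-- Both programs read health["pipeline_ran_today"]; Pre_ requires that key to be present
-- (Python raises KeyError otherwise).

-- task-dict builders (shared text constants; each port assembles them its own way)
def pvTaskPipeline : List (String × String) :=
  [("title", "[Affiliate] Debug: Daily pipeline did not run today"),
   ("description", "Check cron job for daily-pipeline.py. Verify it's scheduled and running at 8 AM. Fix any errors."),
   ("priority", "P1")]

def pvTaskAmazon (n : Int) : List (String × String) :=
  [("title", "[Affiliate] Fix: Replace highlowmyst0e-20 with real Amazon tag"),
   ("description", PySem.Str.join "" ["Replace placeholder Amazon affiliate tag in ", PySem.Int.toStr n, " articles. Boss needs to provide actual Amazon Associates tag. Check hugo.toml and all content files."]),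
   ("priority", "P0")]

def pvTaskThin (n : Int) (examples : List String) : List (String × String) :=
  [("title", PySem.Str.join "" ["[Affiliate] Expand thin articles (", PySem.Int.toStr n, " need work)"]),
   ("description", PySem.Str.join "" ["Articles under 1500 words won't rank. Expand these: ", PySem.Str.join "; " examples, ". Add more product reviews, FAQ section, buying guide."]),
   ("priority", "P2")]

def pvTaskFaq (n : Int) : List (String × String) :=
  [("title", PySem.Str.join "" ["[Affiliate] Add FAQ sections to ", PySem.Int.toStr n, " articles"]),
   ("description", "FAQ sections improve featured snippet chances. Add 5 Q&A items to each article that lacks one. Use FAQ schema shortcode."),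
   ("priority", "P2")]

-- ===== PORT A =====
def create_remediation_tasks (issues : List String) (health : List (String × Bool)) : List (List (String × String)) :=
  match (PySem.Dict.mk health).get? "pipeline_ran_today" with
  | none => []   -- Python raises KeyError here; excluded by Pre_
  | some ran =>
    let tasks_needed : List (List (String × String)) := []
    let tasks_needed := if !ran then tasks_needed ++ [pvTaskPipeline] else tasks_needed
    let amazon_tag_issues := issues.filter (fun i => PySem.Str.isIn "placeholder Amazon tag" i)
    let tasks_needed := if !amazon_tag_issues.isEmpty then tasks_needed ++ [pvTaskAmazon (amazon_tag_issues.length : Int)] else tasks_needed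
    let thin_content := issues.filter (fun i => PySem.Str.isIn "thin content" i)
    let tasks_needed := if thin_content.length ≥ 2 then tasks_needed ++ [pvTaskThin (thin_content.length : Int) (PySem.List.slice thin_content none (some 3))] else tasks_needed
    let faq_missing := issues.filter (fun i => PySem.Str.isIn "missing FAQ" i)
    let tasks_needed := if faq_missing.length ≥ 3 then tasks_needed ++ [pvTaskFaq (faq_missing.length : Int)] else tasks_needed
    tasks_needed

-- ===== PORT B =====
-- one pass over issues: (amazon_n, thin_n, thin_first3, faq_n)
def pvStep (s : Int × Int × List String × Int) (i : String) : Int × Int × List String × Int :=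
  let s := if PySem.Str.isIn "placeholder Amazon tag" i then (s.1 + 1, s.2) else s
  let s := if PySem.Str.isIn "thin content" i then
             (s.1, s.2.1 + 1, (if s.2.2.1.length < 3 then s.2.2.1 ++ [i] else s.2.2.1), s.2.2.2)
           else s
  if PySem.Str.isIn "missing FAQ" i then (s.1, s.2.1, s.2.2.1, s.2.2.2 + 1) else s

def create_remediation_tasks_alt (issues : List String) (health : List (String × Bool)) : List (List (String × String)) :=
  let st := issues.foldl pvStep (0, 0, [], 0)
  match (PySem.Dict.mk health).get? "pipeline_ran_today" with
  | none => []
  | some ran =>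
    let tasks := if !ran then [pvTaskPipeline] else []
    let tasks := if st.1 ≠ 0 then tasks ++ [pvTaskAmazon st.1] else tasks
    let tasks := if st.2.1 ≥ 2 then tasks ++ [pvTaskThin st.2.1 st.2.2.1] else tasks
    if st.2.2.2 ≥ 3 then tasks ++ [pvTaskFaq st.2.2.2] else tasks

-- ===== PRECONDITION & SPEC =====
-- Pre_: the key "pipeline_ran_today" is present in health (Python A raises KeyError otherwise).
def Pre_create_remediation_tasks (issues : List String) (health : List (String × Bool)) : Prop :=
  (PySem.Dict.mk health).contains "pipeline_ran_today" = true
instance (issues : List String) (health : List (String × Bool)) : Decidable (Pre_create_remediation_tasks issues health) := by unfold Pre_create_remediation_tasks; infer_instance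

def pvWitness_create_remediation_tasks : List String × (List (String × Bool)) :=
  (["a: thin content", "b: missing FAQ"], [("pipeline_ran_today", true)])

def Spec_create_remediation_tasks (issues : List String) (health : List (String × Bool)) (out : List (List (String × String))) : Prop := out = create_remediation_tasks_alt issues health
instance (issues : List String) (health : List (String × Bool)) (out : List (List (String × String))) : Decidable (Spec_create_remediation_tasks issues health out) := by unfold Spec_create_remediation_tasks; infer_instance

-- ===== CLAIM (what is proved, stated in full; the proofs are below) =====
def Claim_equal_create_remediation_tasks : Prop := ∀ (issues : List String) (health : List (String × Bool)), Dom_create_remediation_tasks issues health → Pre_create_remediation_tasks issues health → Spec_create_remediation_tasks issues health (create_remediation_tasks issues health)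

-- ===== LEMMAS AND PROOFS =====

-- pvStep written componentwise
lemma pvStep_eq (s : Int × Int × List String × Int) (i : String) :
    pvStep s i =
      (s.1 + (if PySem.Str.isIn "placeholder Amazon tag" i then 1 else 0),
       s.2.1 + (if PySem.Str.isIn "thin content" i then 1 else 0),
       (if PySem.Str.isIn "thin content" i then
          (if s.2.2.1.length < 3 then s.2.2.1 ++ [i] else s.2.2.1) else s.2.2.1),
       s.2.2.2 + (if PySem.Str.isIn "missing FAQ" i then 1 else 0)) := by
  simp only [pvStep]; split_ifs <;> simp

-- the single-pass fold computes exactly the three filter counts and the first-3 prefix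
lemma pvLoop_eq (issues : List String) (a t f : Int) (l : List String) (hl : l.length ≤ 3) :
    issues.foldl pvStep (a, t, l, f) =
      (a + ((issues.filter (fun i => PySem.Str.isIn "placeholder Amazon tag" i)).length : Int),
       t + ((issues.filter (fun i => PySem.Str.isIn "thin content" i)).length : Int),
       (l ++ issues.filter (fun i => PySem.Str.isIn "thin content" i)).take 3,
       f + ((issues.filter (fun i => PySem.Str.isIn "missing FAQ" i)).length : Int)) := by
  induction issues generalizing a t f l with
  | nil => simp [List.take_of_length_le hl]
  | cons i rest ih =>
    simp only [List.foldl_cons, List.filter_cons, pvStep_eq]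
    rw [ih _ _ _ _ (by split_ifs <;> (try simp) <;> omega)]
    simp only [Prod.mk.injEq]
    refine ⟨?_, ?_, ?_, ?_⟩
    · by_cases hA : PySem.Str.isIn "placeholder Amazon tag" i = true <;>
        simp at hA <;> simp [hA] <;> push_cast <;> try ring
    · by_cases hT : PySem.Str.isIn "thin content" i = true <;>
        simp at hT <;> simp [hT] <;> push_cast <;> try ring
    · by_cases hT : PySem.Str.isIn "thin content" i = true
      · simp at hT
        by_cases h3 : l.length < 3
        · simp [hT, h3, List.append_assoc]
        · simp [hT, h3]
          rw [List.take_append_of_le_length (by omega),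
              List.take_append_of_le_length (by omega)]
      · simp at hT
        simp [hT]
    · by_cases hF : PySem.Str.isIn "missing FAQ" i = true <;>
        simp at hF <;> simp [hF] <;> push_cast <;> try ring

theorem create_remediation_tasks_spec : Claim_equal_create_remediation_tasks := by
  intro issues health _ hpre
  unfold Spec_create_remediation_tasks create_remediation_tasks create_remediation_tasks_alt
  unfold Pre_create_remediation_tasks at hpre
  obtain ⟨b, hb⟩ : ∃ b, (PySem.Dict.mk health).get? "pipeline_ran_today" = some b := by
    cases h : (PySem.Dict.mk health).get? "pipeline_ran_today" with
    | none =>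
      rw [PySem.Dict.get?_eq_none_iff_contains] at h
      rw [hpre] at h
      exact absurd h (by simp)
    | some b => exact ⟨b, rfl⟩
  rw [hb, pvLoop_eq issues 0 0 0 [] (by simp)]
  simp only [zero_add, List.nil_append]
  rw [PySem.List.slice_to _ (b:=3) (by norm_num)]
  norm_num
  congr 1
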